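-- pv_equiv track=rewrite | github.com/ibaaj/learning-possibilistic-rule-based-systems | learning.py | buildBi
-- ===== SOURCE A (Python) =====
-- strmap = {
--     "0": "₀", "1": "₁", "2": "₂", "3": "₃", "4": "₄", "5": "₅", "6": "₆",
--     "7": "₇", "8": "₈", "9": "₉",
--     "lambda": "\u03BB", "alpha": "\u03B1", "beta": "\u03B2", "rho": "\u03C1",
--     "Qbar" : u'Q\u0305', 'bar' : u'\u0305',
--     "in" : 	u"\u2208", "pi" : u"\u03C0", "notequal" : u"\u2260",
--     "tau" : u"\u03C4",
--     "epsilon" : u"\u03B5", "Delta" : u"\u0394", "gamma": u"\u03B3", "Gamma": u"\u0393"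
-- }
--
-- def nbAsStrSub(nb):
--     return ''.join([strmap[c] for c in str(nb)])
--
-- def buildmatrix(matrix,letter1,letter2,n,mode,i = 1):
--     if i == 1:
--         if mode == "uplet":
--             matrix = [(letter1 + nbAsStrSub(1),),(letter2 + nbAsStrSub(1),)]
--         if mode == "func":
--             matrix = [letter1 + nbAsStrSub(1),letter2 + nbAsStrSub(1)]
--     else:
--         matrix1 = []
--         matrix2 = []
--         for x in matrix:
--             l1 = x
--             l2 = x
--             if mode == "uplet":
--                 l1 = l1 + (letter1 + nbAsStrSub(i),)
--                 l2 = l2 + (letter2 + nbAsStrSub(i),)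
--             if mode == "func":
--                 l1 = l1 + letter1 + nbAsStrSub(i)
--                 l2 = l2 + letter2 + nbAsStrSub(i)
--
--             matrix1.append(l1)
--             matrix2.append(l2)
--         matrix = matrix1 + matrix2
--
--     if i == n:
--         return matrix
--     else:
--         return buildmatrix(matrix,letter1,letter2,n,mode,i+1)
--
-- def buildBi(n,x1,y1,x2,y2):
--     m1 = buildmatrix([],x1,y1,n,"uplet")
--     m2 = buildmatrix([],x2,y2,n,"uplet")
--
--     Bi = []
--     for x1,x2 in zip(m1,m2):
--         l = []
--         for y1,y2 in zip(x1,x2):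
--             r = ('max', y1, y2)
--             l.append(r)
--         Bi.append(l.copy())
--     return Bi
-- ===== SOURCE B (Python) =====
-- strmap = {
--     "0": "\u2080", "1": "\u2081", "2": "\u2082", "3": "\u2083", "4": "\u2084",
--     "5": "\u2085", "6": "\u2086", "7": "\u2087", "8": "\u2088", "9": "\u2089",
--     "lambda": "\u03BB", "alpha": "\u03B1", "beta": "\u03B2", "rho": "\u03C1",
--     "Qbar": 'Q\u0305', 'bar': '\u0305',
--     "in": "\u2208", "pi": "\u03C0", "notequal": "\u2260", "tau": "\u03C4",
--     "epsilon": "\u03B5", "Delta": "\u0394", "gamma": "\u03B3", "Gamma": "\u0393"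
-- }
--
-- def nbAsStrSub(nb):
--     return ''.join([strmap[c] for c in str(nb)])
--
-- def buildBi(n, x1, y1, x2, y2):
--     Bi = []
--     for r in range(2 ** n):
--         row = []
--         for j in range(1, n + 1):
--             s = nbAsStrSub(j)
--             if (r // 2 ** (j - 1)) % 2 == 1:
--                 row.append(('max', y1 + s, y2 + s))
--             else:
--                 row.append(('max', x1 + s, x2 + s))
--         Bi.append(row)
--     return Bi
-- ===== Notes on version B (the rewrite author's own statement) =====
-- stated objective: simpler
-- what changed: Replaces the recursive doubling of two letter-matrices plus a zip pass by one direct double loop: row r of the 2**n rows picks column j's letters from (x1,x2) or (y1,y2) according to bit j-1 of r.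
import Mathlib
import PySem

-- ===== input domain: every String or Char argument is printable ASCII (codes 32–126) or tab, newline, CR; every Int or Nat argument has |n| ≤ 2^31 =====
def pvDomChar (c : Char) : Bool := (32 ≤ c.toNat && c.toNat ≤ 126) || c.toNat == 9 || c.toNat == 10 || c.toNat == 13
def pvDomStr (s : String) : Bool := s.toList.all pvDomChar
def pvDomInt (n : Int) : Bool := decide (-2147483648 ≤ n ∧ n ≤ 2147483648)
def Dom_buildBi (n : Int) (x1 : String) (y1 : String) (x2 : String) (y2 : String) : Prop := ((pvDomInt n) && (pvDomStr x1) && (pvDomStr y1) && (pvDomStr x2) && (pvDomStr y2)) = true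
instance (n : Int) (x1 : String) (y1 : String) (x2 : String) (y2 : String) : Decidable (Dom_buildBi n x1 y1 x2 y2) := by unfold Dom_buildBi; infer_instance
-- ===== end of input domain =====

-- B replaces A's recursive matrix-doubling plus zip pass by one direct double loop over
-- row index r and column j, selecting letters by bit j-1 of r (objective: simpler).

-- ===== PORT A =====
-- shared helper (identical in Source A and Source B): the module constant strmap and nbAsStrSub
def strmapA : PySem.Dict String String :=
  PySem.Dict.ofList [("0", "₀"), ("1", "₁"), ("2", "₂"), ("3", "₃"), ("4", "₄"), ("5", "₅"), ("6", "₆"),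
   ("7", "₇"), ("8", "₈"), ("9", "₉"),
   ("lambda", "λ"), ("alpha", "α"), ("beta", "β"), ("rho", "ρ"),
   ("Qbar", "Q̅"), ("bar", "̅"),
   ("in", "∈"), ("pi", "π"), ("notequal", "≠"), ("tau", "τ"),
   ("epsilon", "ε"), ("Delta", "Δ"), ("gamma", "γ"), ("Gamma", "Γ")]

-- ''.join([strmap[c] for c in str(nb)]); the .getD "" default is unreachable here:
-- str(nb) of the indices 1..n used below consists of digits, all keys of strmap
def nbAsStrSub (nb : Int) : String :=
  PySem.Str.join "" (((PySem.Int.toStr nb).toList).map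
    (fun c => (PySem.Dict.get? strmapA (String.ofList [c])).getD ""))

-- literal port of buildmatrix, monomorphised to mode = "uplet" (tuples as List String):
-- buildBi only ever passes mode="uplet"; the mode="func" branches (which build plain
-- strings, a different type) are the 'else keep' cases of the ifs below.
-- The 'else matrix' fallback on the recursive call only makes the port total: Python
-- recurses without bound when i > n (i.e. n < 1), which Pre_ excludes.
def buildmatrixA (matrix : List (List String)) (letter1 letter2 : String) (n : Int)
    (mode : String) (i : Int) : List (List String) :=
  let matrix :=
    if i = 1 then
      if mode = "uplet" then [[letter1 ++ nbAsStrSub 1], [letter2 ++ nbAsStrSub 1]] else matrix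
    else
      let p := matrix.foldl
        (fun (acc : List (List String) × List (List String)) x =>
          let l1 := if mode = "uplet" then x ++ [letter1 ++ nbAsStrSub i] else x
          let l2 := if mode = "uplet" then x ++ [letter2 ++ nbAsStrSub i] else x
          (acc.1 ++ [l1], acc.2 ++ [l2])) ([], [])
      p.1 ++ p.2
  if i = n then matrix
  else if h : i < n then buildmatrixA matrix letter1 letter2 n mode (i + 1)
  else matrix
termination_by (n - i).toNat
decreasing_by omega

def buildBi (n : Int) (x1 : String) (y1 : String) (x2 : String) (y2 : String) :
    List (List (String × String × String)) :=
  let m1 := buildmatrixA [] x1 y1 n "uplet" 1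
  let m2 := buildmatrixA [] x2 y2 n "uplet" 1
  (m1.zip m2).foldl
    (fun Bi rr =>
      Bi ++ [(rr.1.zip rr.2).foldl (fun l cc => l ++ [("max", cc.1, cc.2)]) []]) []

-- ===== PORT B =====
def buildBi_alt (n : Int) (x1 : String) (y1 : String) (x2 : String) (y2 : String) :
    List (List (String × String × String)) :=
  (PySem.List.pyRange 0 ((2 : Int) ^ n.toNat) 1).map (fun r =>
    (PySem.List.pyRange 1 (n + 1) 1).map (fun j =>
      let s := nbAsStrSub j
      if PySem.Int.mod (PySem.Int.floordiv r ((2 : Int) ^ (j - 1).toNat)) 2 = 1 then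
        ("max", y1 ++ s, y2 ++ s)
      else
        ("max", x1 ++ s, x2 ++ s)))

-- ===== PRECONDITION & SPEC =====
-- Python A recurses without bound (until the doubling matrix exhausts memory /
-- RecursionError) whenever n < 1, so only n ≥ 1 is admitted.
def Pre_buildBi (n : Int) (x1 : String) (y1 : String) (x2 : String) (y2 : String) : Prop :=
  1 ≤ n
instance (n : Int) (x1 : String) (y1 : String) (x2 : String) (y2 : String) :
    Decidable (Pre_buildBi n x1 y1 x2 y2) := by unfold Pre_buildBi; infer_instance

def pvWitness_buildBi : Int × String × String × String × String := (2, "x", "y", "u", "v")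

def Spec_buildBi (n : Int) (x1 : String) (y1 : String) (x2 : String) (y2 : String)
    (out : List (List (String × String × String))) : Prop := out = buildBi_alt n x1 y1 x2 y2
instance (n : Int) (x1 : String) (y1 : String) (x2 : String) (y2 : String)
    (out : List (List (String × String × String))) : Decidable (Spec_buildBi n x1 y1 x2 y2 out) := by
  unfold Spec_buildBi; infer_instance

-- ===== CLAIM (what is proved, stated in full; the proofs are below) =====
def Claim_equal_buildBi : Prop := ∀ (n : Int) (x1 : String) (y1 : String) (x2 : String) (y2 : String), Dom_buildBi n x1 y1 x2 y2 → Pre_buildBi n x1 y1 x2 y2 → Spec_buildBi n x1 y1 x2 y2 (buildBi n x1 y1 x2 y2)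

-- ===== LEMMAS AND PROOFS =====

-- the r-th row of the letter matrix with k columns: column j (0-based) selects b
-- iff bit j of r is set
def Mrow (a b : String) (k : Nat) (r : Nat) : List String :=
  (List.range k).map (fun j =>
    if r / 2 ^ j % 2 = 1 then b ++ nbAsStrSub (Int.ofNat j + 1) else a ++ nbAsStrSub (Int.ofNat j + 1))

def Mmat (a b : String) (k : Nat) : List (List String) :=
  (List.range (2 ^ k)).map (Mrow a b k)

theorem Mrow_succ_lo (a b : String) (k r : Nat) (hr : r < 2 ^ k) :
    Mrow a b (k + 1) r = Mrow a b k r ++ [a ++ nbAsStrSub (Int.ofNat k + 1)] := by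
  unfold Mrow
  rw [List.range_succ, List.map_append]
  simp [Nat.div_eq_of_lt hr]

theorem Mrow_succ_hi (a b : String) (k r : Nat) (hr : r < 2 ^ k) :
    Mrow a b (k + 1) (2 ^ k + r) = Mrow a b k r ++ [b ++ nbAsStrSub (Int.ofNat k + 1)] := by
  unfold Mrow
  rw [List.range_succ, List.map_append]
  congr 1
  · apply List.map_congr_left
    intro j hj
    rw [List.mem_range] at hj
    have h1 : (2 ^ k + r) / 2 ^ j = 2 ^ (k - j) + r / 2 ^ j := by
      have hsplit : 2 ^ k = 2 ^ j * 2 ^ (k - j) := by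
        rw [← pow_add]; congr 1; omega
      rw [hsplit, Nat.mul_add_div (Nat.pow_pos (by norm_num))]
    have h2 : 2 ^ (k - j) % 2 = 0 := by
      have : k - j = (k - j - 1) + 1 := by omega
      rw [this, pow_succ, Nat.mul_mod_left]
    rw [h1, Nat.add_mod, h2]
    simp
  · have hone : (2 ^ k + r) / 2 ^ k = 1 := by
      rw [Nat.add_comm, Nat.add_div_right _ (Nat.pow_pos (by norm_num)), Nat.div_eq_of_lt hr]
    simp [hone]

theorem Mmat_succ (a b : String) (k : Nat) :
    Mmat a b (k + 1) =
      (Mmat a b k).map (· ++ [a ++ nbAsStrSub (Int.ofNat k + 1)]) ++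
      (Mmat a b k).map (· ++ [b ++ nbAsStrSub (Int.ofNat k + 1)]) := by
  unfold Mmat
  have : 2 ^ (k + 1) = 2 ^ k + 2 ^ k := by ring
  rw [this, List.range_add, List.map_append, List.map_map, List.map_map, List.map_map]
  congr 1
  · exact List.map_congr_left (fun r hr => Mrow_succ_lo a b k r (List.mem_range.mp hr))
  · exact List.map_congr_left (fun r hr => by
      have := Mrow_succ_hi a b k r (List.mem_range.mp hr)
      simpa using this)

theorem Mmat_one (a b : String) :
    Mmat a b 1 = [[a ++ nbAsStrSub 1], [b ++ nbAsStrSub 1]] := by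
  unfold Mmat Mrow
  simp [List.range_succ]

-- one step of A's buildmatrix loop body (mode = "uplet"), as a function
def bmStep (a b : String) (m : List (List String)) (i : Int) : List (List String) :=
  if i = 1 then [[a ++ nbAsStrSub 1], [b ++ nbAsStrSub 1]]
  else m.map (· ++ [a ++ nbAsStrSub i]) ++ m.map (· ++ [b ++ nbAsStrSub i])

-- clean unfolding equation for buildmatrixA at mode = "uplet"
theorem buildmatrixA_eq (a b : String) (n i : Int) (m : List (List String)) :
    buildmatrixA m a b n "uplet" i =
      if i = n then bmStep a b m i
      else if i < n then buildmatrixA (bmStep a b m i) a b n "uplet" (i + 1)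
      else bmStep a b m i := by
  rw [buildmatrixA]
  have hcore :
      (if i = 1 then [[a ++ nbAsStrSub 1], [b ++ nbAsStrSub 1]]
       else
         (m.foldl (fun (acc : List (List String) × List (List String)) x =>
            (acc.1 ++ [x ++ [a ++ nbAsStrSub i]], acc.2 ++ [x ++ [b ++ nbAsStrSub i]])) ([], [])).1 ++
         (m.foldl (fun (acc : List (List String) × List (List String)) x =>
            (acc.1 ++ [x ++ [a ++ nbAsStrSub i]], acc.2 ++ [x ++ [b ++ nbAsStrSub i]])) ([], [])).2)
      = bmStep a b m i := by
    unfold bmStep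
    by_cases hi : i = 1
    · simp [hi]
    · rw [if_neg hi, if_neg hi]
      rw [PySem.List.foldl_prod_mk
        (f := fun acc x => acc ++ [x ++ [a ++ nbAsStrSub i]])
        (g := fun acc x => acc ++ [x ++ [b ++ nbAsStrSub i]])]
      rw [PySem.List.foldl_append_singleton_eq_map, PySem.List.foldl_append_singleton_eq_map]
      simp
  simp only [if_true, dite_eq_ite, hcore]

-- one loop step produces the next letter matrix
theorem bmStep_closed (a b : String) (m : List (List String)) (i : Int)
    (h1 : 1 ≤ i) (hm : i = 1 ∨ m = Mmat a b (i - 1).toNat) :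
    bmStep a b m i = Mmat a b i.toNat := by
  unfold bmStep
  by_cases hi : i = 1
  · subst hi; simp [Mmat_one]
  · have hm' := hm.resolve_left hi
    rw [if_neg hi]
    have hk : i.toNat = (i - 1).toNat + 1 := by omega
    have hc : Int.ofNat (i - 1).toNat + 1 = i := by
      simp only [Int.ofNat_eq_natCast]; omega
    rw [hk, Mmat_succ, hc, hm']

-- the invariant of A's buildmatrix recursion (mode = "uplet")
theorem buildmatrixA_inv (a b : String) (n : Int) :
    ∀ (t : Nat) (i : Int) (m : List (List String)), 1 ≤ i → i + t = n →
      (i = 1 ∨ m = Mmat a b (i - 1).toNat) →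
      buildmatrixA m a b n "uplet" i = Mmat a b n.toNat := by
  intro t
  induction t with
  | zero =>
    intro i m h1 hn hm
    have hin : i = n := by omega
    rw [buildmatrixA_eq, if_pos hin, bmStep_closed a b m i h1 hm, hin]
  | succ t ih =>
    intro i m h1 hn hm
    have hne : i ≠ n := by omega
    have hlt : i < n := by omega
    rw [buildmatrixA_eq, if_neg hne, if_pos hlt]
    exact ih (i + 1) _ (by omega) (by omega)
      (Or.inr (by rw [bmStep_closed a b m i h1 hm]; congr 1; omega))

theorem buildmatrixA_closed (a b : String) (n : Int) (hn : 1 ≤ n) :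
    buildmatrixA [] a b n "uplet" 1 = Mmat a b n.toNat :=
  buildmatrixA_inv a b n (n - 1).toNat 1 [] (by omega) (by omega) (Or.inl rfl)

-- A's buildBi in closed form
theorem buildBi_closed (n : Int) (x1 y1 x2 y2 : String) (hn : 1 ≤ n) :
    buildBi n x1 y1 x2 y2 =
      (List.range (2 ^ n.toNat)).map (fun r =>
        (List.range n.toNat).map (fun j =>
          if r / 2 ^ j % 2 = 1 then
            ("max", y1 ++ nbAsStrSub (Int.ofNat j + 1), y2 ++ nbAsStrSub (Int.ofNat j + 1))
          else
            ("max", x1 ++ nbAsStrSub (Int.ofNat j + 1), x2 ++ nbAsStrSub (Int.ofNat j + 1)))) := by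
  unfold buildBi
  dsimp only
  rw [buildmatrixA_closed x1 y1 n hn, buildmatrixA_closed x2 y2 n hn]
  unfold Mmat
  rw [List.zip_map']
  rw [List.foldl_map]
  rw [PySem.List.foldl_append_singleton_eq_map
    (f := fun r => ((Mrow x1 y1 n.toNat r).zip (Mrow x2 y2 n.toNat r)).foldl
      (fun l cc => l ++ [("max", cc.1, cc.2)]) [])]
  simp only [List.nil_append]
  apply List.map_congr_left
  intro r _
  unfold Mrow
  rw [List.zip_map', List.foldl_map]
  rw [PySem.List.foldl_append_singleton_eq_map]
  simp only [List.nil_append]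
  apply List.map_congr_left
  intro j _
  by_cases h : r / 2 ^ j % 2 = 1 <;> simp [h]

-- B's buildBi_alt in the same closed form
theorem buildBi_alt_closed (n : Int) (x1 y1 x2 y2 : String) (hn : 1 ≤ n) :
    buildBi_alt n x1 y1 x2 y2 =
      (List.range (2 ^ n.toNat)).map (fun r =>
        (List.range n.toNat).map (fun j =>
          if r / 2 ^ j % 2 = 1 then
            ("max", y1 ++ nbAsStrSub (Int.ofNat j + 1), y2 ++ nbAsStrSub (Int.ofNat j + 1))
          else
            ("max", x1 ++ nbAsStrSub (Int.ofNat j + 1), x2 ++ nbAsStrSub (Int.ofNat j + 1)))) := by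
  unfold buildBi_alt
  dsimp only
  rw [PySem.List.pyRange_one 0 ((2 : Int) ^ n.toNat), PySem.List.pyRange_one 1 (n + 1)]
  have h2 : (((2 : Int) ^ n.toNat) - 0).toNat = 2 ^ n.toNat := by
    rw [sub_zero]
    have hcast : ((2 : Int) ^ n.toNat) = ((2 ^ n.toNat : Nat) : Int) := by push_cast; ring
    rw [hcast, Int.toNat_natCast]
  have hn1 : (n + 1 - 1).toNat = n.toNat := by omega
  rw [h2, hn1, List.map_map]
  apply List.map_congr_left
  intro r _
  simp only [Function.comp_apply]
  rw [List.map_map]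
  apply List.map_congr_left
  intro j _
  simp only [Function.comp_apply]
  have hj : ((1 : Int) + (j : Int) - 1).toNat = j := by omega
  have hfd : PySem.Int.floordiv ((0 : Int) + (r : Int)) ((2 : Int) ^ j) = ((r / 2 ^ j : Nat) : Int) := by
    rw [zero_add]
    have hcast : ((2 : Int) ^ j) = ((2 ^ j : Nat) : Int) := by push_cast; ring
    rw [hcast, PySem.Int.floordiv_natCast]
  have hmd : PySem.Int.mod (((r / 2 ^ j : Nat) : Int)) 2 = ((r / 2 ^ j % 2 : Nat) : Int) := by
    exact_mod_cast PySem.Int.mod_natCast (r / 2 ^ j) 2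
  rw [hj, hfd, hmd]
  have hjc : (1 : Int) + (j : Int) = Int.ofNat j + 1 := by
    simp only [Int.ofNat_eq_natCast]; ring
  rw [hjc]
  by_cases h : r / 2 ^ j % 2 = 1
  · rw [if_pos (by exact_mod_cast congrArg (Nat.cast : Nat → Int) h), if_pos h]
  · rw [if_neg (by exact_mod_cast fun hc => h (by exact_mod_cast hc)), if_neg h]

-- ===== VERDICT (by name: the statement is the Claim_ definition above) =====
theorem buildBi_spec : Claim_equal_buildBi := by
  intro n x1 y1 x2 y2 _ hpre
  unfold Spec_buildBi
  rw [buildBi_closed n x1 y1 x2 y2 hpre, buildBi_alt_closed n x1 y1 x2 y2 hpre]
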